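-- pv_equiv track=rewrite | github.com/finnfujimura/LEI-SRML-Intern-Project | scripts/stw_pipeline_common.py | compress_hhmm_ranges
-- ===== SOURCE A (Python) =====
-- def hhmm_to_minute_index(value: int) -> int:
--     """Convert an HHMM value to a 0-based minute index (0--1439).
--
--     ``0001 -> 0``, ``0002 -> 1``, ... ``2400 -> 1439``.
--     """
--     if value == 2400:
--         return 1439
--     hh = value // 100
--     mm = value % 100
--     return hh * 60 + mm - 1
--
-- def compress_hhmm_ranges(values: list[int]) -> str:
--     """Compress a sorted list of HHMM timestamps into a compact range string.
--
--     Consecutive minutes are collapsed into ``start-end`` ranges separated by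
--     semicolons.  For example, ``[1, 2, 3, 100, 200, 201]`` becomes
--     ``"1-3;100;200-201"``.  Returns ``"NONE"`` for an empty list.
--     """
--     if not values:
--         return "NONE"
--
--     ranges: list[str] = []
--     start = prev = values[0]
--     for v in values[1:]:
--         if hhmm_to_minute_index(v) == hhmm_to_minute_index(prev) + 1:
--             prev = v
--             continue
--         if start == prev:
--             ranges.append(str(start))
--         else:
--             ranges.append(f"{start}-{prev}")
--         start = prev = v
--     if start == prev:
--         ranges.append(str(start))
--     else:
--         ranges.append(f"{start}-{prev}")
--     return ";".join(ranges)
-- ===== SOURCE B (Python) =====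
-- from itertools import groupby
--
--
-- def hhmm_to_minute_index(value: int) -> int:
--     if value == 2400:
--         return 1439
--     return (value // 100) * 60 + value % 100 - 1
--
--
-- def compress_hhmm_ranges(values: list[int]) -> str:
--     if not values:
--         return "NONE"
--     parts = []
--     for _, run in groupby(enumerate(values),
--                           key=lambda p: p[0] - hhmm_to_minute_index(p[1])):
--         run = list(run)
--         first, last = run[0][1], run[-1][1]
--         parts.append(str(first) if first == last else f"{first}-{last}")
--     return ";".join(parts)
-- ===== Notes on version B (the rewrite author's own statement) =====
-- stated objective: idiomatic
-- what changed: B replaces A's manual start/prev accumulator loop by grouping consecutive-minute runs with itertools.groupby on the enumeration-offset key (position - minute index) and formatting each group from its first and last element.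
import Mathlib
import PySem

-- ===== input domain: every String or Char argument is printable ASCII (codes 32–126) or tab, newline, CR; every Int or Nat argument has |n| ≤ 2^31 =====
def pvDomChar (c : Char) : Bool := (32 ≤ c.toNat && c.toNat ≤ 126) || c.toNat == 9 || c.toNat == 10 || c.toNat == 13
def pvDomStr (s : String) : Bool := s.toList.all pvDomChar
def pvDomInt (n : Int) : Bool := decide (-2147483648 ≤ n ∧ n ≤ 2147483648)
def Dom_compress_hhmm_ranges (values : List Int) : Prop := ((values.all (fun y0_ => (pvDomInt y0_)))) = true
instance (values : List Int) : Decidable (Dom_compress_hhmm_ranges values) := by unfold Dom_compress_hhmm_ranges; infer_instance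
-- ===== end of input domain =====

-- B groups runs of consecutive minutes in one pass via the enumeration-offset
-- key (position − minute index) with itertools.groupby, instead of A's manual
-- start/prev accumulator loop; same output, more idiomatic decomposition.

-- ===== PORT A =====
def hhmm_to_minute_index (value : Int) : Int :=
  if value == 2400 then 1439
  else
    let hh := PySem.Int.floordiv value 100
    let mm := PySem.Int.mod value 100
    hh * 60 + mm - 1

def compress_hhmm_ranges (values : List Int) : String :=
  match values with
  | [] => "NONE"
  | v0 :: rest =>
    let step := fun (st : List String × Int × Int) (v : Int) =>
      let (ranges, start, prev) := st
      if hhmm_to_minute_index v == hhmm_to_minute_index prev + 1 then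
        (ranges, start, v)
      else
        (ranges ++ [if start == prev then PySem.Int.toStr start
                    else PySem.Int.toStr start ++ "-" ++ PySem.Int.toStr prev], v, v)
    let (ranges, start, prev) := rest.foldl step ([], v0, v0)
    PySem.Str.join ";"
      (ranges ++ [if start == prev then PySem.Int.toStr start
                  else PySem.Int.toStr start ++ "-" ++ PySem.Int.toStr prev])

-- ===== PORT B =====
def hhmmToMinuteIndexB (value : Int) : Int :=
  if value == 2400 then 1439
  else (PySem.Int.floordiv value 100) * 60 + PySem.Int.mod value 100 - 1

-- itertools.groupby on adjacent-equal keys is ported as List.splitBy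
def runKey (p : Int × Int) : Int := p.1 - hhmmToMinuteIndexB p.2

def renderRun (run : List (Int × Int)) : String :=
  let first := (run.headD (0, 0)).2
  let last := (run.getLastD (0, 0)).2
  if first == last then PySem.Int.toStr first
  else PySem.Int.toStr first ++ "-" ++ PySem.Int.toStr last

def compress_hhmm_ranges_alt (values : List Int) : String :=
  match values with
  | [] => "NONE"
  | _ =>
    let runs := (PySem.List.enumerate values).splitBy (fun p q => runKey p == runKey q)
    PySem.Str.join ";" (runs.map renderRun)

-- ===== PRECONDITION & SPEC =====
def Spec_compress_hhmm_ranges (values : List Int) (out : String) : Prop := out = compress_hhmm_ranges_alt values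
instance (values : List Int) (out : String) : Decidable (Spec_compress_hhmm_ranges values out) := by unfold Spec_compress_hhmm_ranges; infer_instance

-- ===== CLAIM (what is proved, stated in full; the proofs are below) =====
def Claim_equal_compress_hhmm_ranges : Prop := ∀ (values : List Int), Dom_compress_hhmm_ranges values → Spec_compress_hhmm_ranges values (compress_hhmm_ranges values)

-- ===== LEMMAS AND PROOFS =====

/-- Format one maximal run given its first and last original value. -/
def fmtRange (s p : Int) : String :=
  if s == p then PySem.Int.toStr s else PySem.Int.toStr s ++ "-" ++ PySem.Int.toStr p

/-- Common recursive specification of the list of range strings. -/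
def rangesSpec (s p : Int) : List Int → List String
  | [] => [fmtRange s p]
  | v :: t =>
    if hhmm_to_minute_index v == hhmm_to_minute_index p + 1 then rangesSpec s v t
    else fmtRange s p :: rangesSpec v v t

theorem idxB_eq (v : Int) : hhmmToMinuteIndexB v = hhmm_to_minute_index v := rfl

/-- Head-with-default of an append with nonempty left part. -/
theorem headD2_append (A B : List (Int × Int)) (hA : A ≠ []) :
    (A ++ B).headD ((0 : Int), (0 : Int)) = A.headD (0, 0) := by
  cases A with
  | nil => exact absurd rfl hA
  | cons a t => rfl

/-- A's loop body, written with `fmtRange` (definitionally the port's lambda). -/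
def stepFmt (st : List String × Int × Int) (v : Int) : List String × Int × Int :=
  if hhmm_to_minute_index v == hhmm_to_minute_index st.2.2 + 1 then (st.1, st.2.1, v)
  else (st.1 ++ [fmtRange st.2.1 st.2.2], v, v)

-- A's fold, followed by the trailing flush, renders rs ++ rangesSpec s p t.
theorem foldA_eq (t : List Int) (rs : List String) (s p : Int) :
    (t.foldl stepFmt (rs, s, p)).1 ++
      [fmtRange (t.foldl stepFmt (rs, s, p)).2.1 (t.foldl stepFmt (rs, s, p)).2.2]
    = rs ++ rangesSpec s p t := by
  induction t generalizing rs s p with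
  | nil => simp [rangesSpec]
  | cons v t ih =>
    have hstep : stepFmt (rs, s, p) v =
        if hhmm_to_minute_index v == hhmm_to_minute_index p + 1 then (rs, s, v)
        else (rs ++ [fmtRange s p], v, v) := rfl
    rw [List.foldl_cons, hstep]
    simp only [rangesSpec]
    by_cases h : (hhmm_to_minute_index v == hhmm_to_minute_index p + 1) = true
    · rw [if_pos h, if_pos h]
      exact ih rs s v
    · rw [if_neg h, if_neg h, ih (rs ++ [fmtRange s p]) v v]
      simp

theorem splitByLoop_flush {α : Type} (r : α → α → Bool) (l : List α) (a : α)
    (g : List α) (gs : List (List α)) :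
    List.splitBy.loop r l a g gs = gs.reverse ++ List.splitBy.loop r l a g [] := by
  induction l generalizing a g gs with
  | nil => simp [List.splitBy.loop]
  | cons b l ih =>
    simp only [List.splitBy.loop]
    split
    · exact ih b (a :: g) gs
    · rw [ih b [] (((a :: g).reverse) :: gs), ih b [] [((a :: g).reverse)]]
      simp

-- Rendering a flushed run whose first element has value s and last value p.
theorem render_flush (gRev : List (Int × Int)) (i p s : Int)
    (hs : ((gRev.reverse ++ [(i, p)]).headD (0, 0)).2 = s) :
    renderRun (gRev.reverse ++ [(i, p)]) = fmtRange s p := by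
  unfold renderRun fmtRange
  have h2 : (gRev.reverse ++ [(i, p)]).getLastD (0, 0) = (i, p) := by
    rw [List.getLastD_eq_getLast?, List.getLast?_concat]
    rfl
  rw [h2, hs]

-- B's grouping loop renders to rangesSpec (s = first value of the open run).
theorem loopB_eq (t : List Int) (i : Int) (p s : Int) (gRev : List (Int × Int))
    (hs : ((gRev.reverse ++ [(i, p)]).headD (0, 0)).2 = s) :
    (List.splitBy.loop (fun p q => runKey p == runKey q)
        (PySem.List.enumerate t (i + 1)) (i, p) gRev []).map renderRun
      = rangesSpec s p t := by
  induction t generalizing i p gRev s with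
  | nil =>
    simp only [PySem.List.enumerate_nil, List.splitBy.loop, List.reverse_cons,
      List.reverse_nil, List.nil_append, List.map_cons, List.map_nil]
    rw [render_flush gRev i p s hs]
    rfl
  | cons v t ih =>
    rw [PySem.List.enumerate_cons]
    simp only [List.splitBy.loop]
    by_cases h : (hhmm_to_minute_index v == hhmm_to_minute_index p + 1) = true
    · have hk : (runKey (i, p) == runKey (i + 1, v)) = true := by
        simp only [runKey, idxB_eq, beq_iff_eq] at h ⊢
        omega
      rw [hk]
      rw [rangesSpec, if_pos h]
      refine ih (i + 1) v s ((i, p) :: gRev) ?_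
      rw [List.reverse_cons, headD2_append (gRev.reverse ++ [(i, p)]) _ (by simp)]
      exact hs
    · have hk : (runKey (i, p) == runKey (i + 1, v)) = false := by
        simp only [runKey, idxB_eq, beq_eq_false_iff_ne, ne_eq, beq_iff_eq] at h ⊢
        omega
      rw [hk]
      rw [rangesSpec, if_neg h, splitByLoop_flush _ _ _ [] [((i, p) :: gRev).reverse]]
      simp only [List.reverse_cons, List.reverse_nil, List.nil_append,
        List.map_cons, List.singleton_append]
      rw [render_flush gRev i p s hs, ih (i + 1) v v [] (by simp)]

-- ===== VERDICT (by name: the statement is the Claim_ definition above) =====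
theorem compress_hhmm_ranges_spec : Claim_equal_compress_hhmm_ranges := by
  unfold Claim_equal_compress_hhmm_ranges
  intro values _
  unfold Spec_compress_hhmm_ranges
  match values with
  | [] => rfl
  | v0 :: rest =>
    have hA : compress_hhmm_ranges (v0 :: rest) =
        PySem.Str.join ";"
          ((rest.foldl stepFmt ([], v0, v0)).1 ++
            [fmtRange (rest.foldl stepFmt ([], v0, v0)).2.1
              (rest.foldl stepFmt ([], v0, v0)).2.2]) := rfl
    have hB : compress_hhmm_ranges_alt (v0 :: rest) =
        PySem.Str.join ";"
          ((List.splitBy.loop (fun p q => runKey p == runKey q)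
              (PySem.List.enumerate rest (0 + 1)) ((0 : Int), v0) [] []).map renderRun) := by
      rfl
    rw [hA, hB, foldA_eq rest [] v0 v0, loopB_eq rest 0 v0 v0 [] (by simp), List.nil_append]
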